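-- pv_equiv track=rewrite | github.com/llc-552/Veta | main/teaching_agents/export_manager_agent.py | _find_best_image_match
-- ===== SOURCE A (Python) =====
-- from typing import Dict, Any, List, Optional
--
-- def _find_best_image_match(
--
--     query: str,
--     indexed_images: List[Dict[str, Any]]
-- ) -> Optional[Dict[str, Any]]:
--     """
--     Find the most semantically relevant image for a query string.
--     First tries exact filename match, then falls back to keyword overlap
--     against image descriptions.
--
--     Args:
--         query: Search string (image description hint or filename)
--         indexed_images: List of {path, filename, description} dicts
--
--     Returns:
--         Best matching image dict or None
--     """
--     if not indexed_images:
--         return None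
--
--     query_lower = query.lower().strip()
--
--     # 1. Exact filename match
--     for img in indexed_images:
--         if img.get("filename", "").lower() == query_lower:
--             return img
--
--     # 2. Filename contains query
--     for img in indexed_images:
--         if query_lower in img.get("filename", "").lower():
--             return img
--
--     # 3. Keyword overlap with description
--     query_words = set(query_lower.replace(",", " ").split())
--     best_img = None
--     best_score = 0
--     for img in indexed_images:
--         desc_words = set(img.get("description", "").lower().split())
--         score = len(query_words & desc_words)
--         if score > best_score:
--             best_score = score
--             best_img = img
--
--     return best_img if best_score > 0 else None
-- ===== SOURCE B (Python) =====
-- from typing import Dict, Any, List, Optional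
--
-- def _find_best_image_match(
--     query: str,
--     indexed_images: List[Dict[str, Any]]
-- ) -> Optional[Dict[str, Any]]:
--     """Single pass: rank each image by (tier, score, -index) and keep the maximum."""
--     query_lower = query.lower().strip()
--     query_words = set(query_lower.replace(",", " ").split())
--
--     def rank(img):
--         fname = img.get("filename", "").lower()
--         if fname == query_lower:
--             return (3, 0)
--         if query_lower in fname:
--             return (2, 0)
--         score = len(query_words & set(img.get("description", "").lower().split()))
--         return None if score == 0 else (1, score)
--
--     best_key = None
--     best_img = None
--     for i, img in enumerate(indexed_images):
--         r = rank(img)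
--         if r is None:
--             continue
--         key = (r[0], r[1], -i)
--         if best_key is None or key > best_key:
--             best_key = key
--             best_img = img
--     return best_img
-- ===== Notes on version B (the rewrite author's own statement) =====
-- stated objective: alternative
-- what changed: Replaces A's three sequential scans (exact filename match, substring match, keyword-overlap fold) by a single pass that ranks every image with a lexicographic (tier, score, -index) key and keeps the maximum.
import Mathlib
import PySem

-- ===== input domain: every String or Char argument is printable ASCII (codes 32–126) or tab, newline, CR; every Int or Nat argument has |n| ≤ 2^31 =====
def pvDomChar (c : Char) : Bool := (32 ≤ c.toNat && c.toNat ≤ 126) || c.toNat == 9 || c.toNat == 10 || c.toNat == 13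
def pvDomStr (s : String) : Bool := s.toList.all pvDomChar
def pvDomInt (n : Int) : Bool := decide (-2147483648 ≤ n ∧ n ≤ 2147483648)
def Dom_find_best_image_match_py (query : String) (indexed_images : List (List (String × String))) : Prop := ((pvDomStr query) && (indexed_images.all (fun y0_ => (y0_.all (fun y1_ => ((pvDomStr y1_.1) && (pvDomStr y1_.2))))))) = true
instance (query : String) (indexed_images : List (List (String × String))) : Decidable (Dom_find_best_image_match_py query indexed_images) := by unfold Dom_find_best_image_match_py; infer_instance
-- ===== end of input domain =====

-- B replaces A's three sequential scans by a single pass that ranks every image with a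
-- lexicographic key (tier, score, -index) and keeps the maximum (objective: alternative decomposition).

-- ===== PORT A =====
def find_best_image_match_py (query : String) (indexed_images : List (List (String × String))) : Option (List (String × String)) :=
  if indexed_images = [] then none
  else
    let query_lower := PySem.Str.strip (PySem.Str.lower query)
    -- 1. exact filename match
    match indexed_images.find? (fun img => PySem.Str.lower (PySem.Dict.getD (PySem.Dict.mk img) "filename" "") == query_lower) with
    | some img => some img
    | none =>
      -- 2. filename contains query
      match indexed_images.find? (fun img => PySem.Str.isIn query_lower (PySem.Str.lower (PySem.Dict.getD (PySem.Dict.mk img) "filename" ""))) with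
      | some img => some img
      | none =>
        -- 3. keyword overlap with description
        let query_words := PySem.Set.ofList (PySem.Str.split₀ (PySem.Str.replace query_lower "," " "))
        let r := indexed_images.foldl
          (fun (st : Option (List (String × String)) × Int) img =>
            let desc_words := PySem.Set.ofList (PySem.Str.split₀ (PySem.Str.lower (PySem.Dict.getD (PySem.Dict.mk img) "description" "")))
            let score := PySem.Set.len (PySem.Set.inter query_words desc_words)
            if score > st.2 then (some img, score) else st)
          (none, 0)
        if r.2 > 0 then r.1 else none

-- ===== PORT B =====
-- Python tuple comparison key > best (strict, lexicographic) on (tier, score, -index)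
def pvKeyGt (a b : Int × Int × Int) : Bool :=
  decide (a.1 > b.1) || (a.1 == b.1 && (decide (a.2.1 > b.2.1) || (a.2.1 == b.2.1 && decide (a.2.2 > b.2.2))))

-- Python helper `rank`: tier/score of one image, None when it matches nothing
def pvRank (query_lower : String) (query_words : PySem.Set String) (img : List (String × String)) : Option (Int × Int) :=
  let fname := PySem.Str.lower (PySem.Dict.getD (PySem.Dict.mk img) "filename" "")
  if fname == query_lower then some (3, 0)
  else if PySem.Str.isIn query_lower fname then some (2, 0)
  else
    let score := PySem.Set.len (PySem.Set.inter query_words (PySem.Set.ofList (PySem.Str.split₀ (PySem.Str.lower (PySem.Dict.getD (PySem.Dict.mk img) "description" "")))))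
    if score == 0 then none else some (1, score)

-- loop body: advance the index, keep the maximal (tier, score, -i) key
def pvStepB (query_lower : String) (query_words : PySem.Set String)
    (st : Int × Option ((Int × Int × Int) × List (String × String))) (img : List (String × String)) :
    Int × Option ((Int × Int × Int) × List (String × String)) :=
  match pvRank query_lower query_words img with
  | none => (st.1 + 1, st.2)
  | some r =>
    match st.2 with
    | none => (st.1 + 1, some ((r.1, r.2, -st.1), img))
    | some best => (st.1 + 1, if pvKeyGt (r.1, r.2, -st.1) best.1 then ((r.1, r.2, -st.1), img) else best)

def find_best_image_match_py_alt (query : String) (indexed_images : List (List (String × String))) : Option (List (String × String)) :=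
  let query_lower := PySem.Str.strip (PySem.Str.lower query)
  let query_words := PySem.Set.ofList (PySem.Str.split₀ (PySem.Str.replace query_lower "," " "))
  ((indexed_images.foldl (pvStepB query_lower query_words) ((0 : Int), none)).2).map (fun p => p.2)

-- ===== PRECONDITION & SPEC =====
def Spec_find_best_image_match_py (query : String) (indexed_images : List (List (String × String))) (out : Option (List (String × String))) : Prop := out = find_best_image_match_py_alt query indexed_images
instance (query : String) (indexed_images : List (List (String × String))) (out : Option (List (String × String))) : Decidable (Spec_find_best_image_match_py query indexed_images out) := by unfold Spec_find_best_image_match_py; infer_instance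

-- ===== CLAIM (what is proved, stated in full; the proofs are below) =====
def Claim_equal_find_best_image_match_py : Prop := ∀ (query : String) (indexed_images : List (List (String × String))), Dom_find_best_image_match_py query indexed_images → Spec_find_best_image_match_py query indexed_images (find_best_image_match_py query indexed_images)

-- ===== LEMMAS AND PROOFS =====

-- proof-side names for the tests and scores both programs compute
def pvF3 (ql : String) (img : List (String × String)) : Bool :=
  PySem.Str.lower (PySem.Dict.getD (PySem.Dict.mk img) "filename" "") == ql

def pvF2 (ql : String) (img : List (String × String)) : Bool :=
  PySem.Str.isIn ql (PySem.Str.lower (PySem.Dict.getD (PySem.Dict.mk img) "filename" ""))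

def pvSc (qw : PySem.Set String) (img : List (String × String)) : Int :=
  PySem.Set.len (PySem.Set.inter qw (PySem.Set.ofList (PySem.Str.split₀ (PySem.Str.lower (PySem.Dict.getD (PySem.Dict.mk img) "description" "")))))

lemma pvRank_def (ql : String) (qw : PySem.Set String) (img : List (String × String)) :
    pvRank ql qw img =
      (if pvF3 ql img then some (3, 0)
       else if pvF2 ql img then some (2, 0)
       else if pvSc qw img == 0 then none else some (1, pvSc qw img)) := rfl

-- index-free strict comparison and index-free abstraction of B's loop
def pvGt2 (a b : Int × Int) : Bool := decide (a.1 > b.1) || (a.1 == b.1 && decide (a.2 > b.2))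

def pvAstep (ql : String) (qw : PySem.Set String)
    (st : Option ((Int × Int) × List (String × String))) (img : List (String × String)) :
    Option ((Int × Int) × List (String × String)) :=
  match pvRank ql qw img with
  | none => st
  | some ts =>
    match st with
    | none => some (ts, img)
    | some best => if pvGt2 ts best.1 then (ts, img) else best

def pvAbs (ql : String) (qw : PySem.Set String)
    (st : Option ((Int × Int) × List (String × String))) (l : List (List (String × String))) :
    Option ((Int × Int) × List (String × String)) :=
  l.foldl (pvAstep ql qw) st

def pvShrink (p : (Int × Int × Int) × List (String × String)) : (Int × Int) × List (String × String) :=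
  ((p.1.1, p.1.2.1), p.2)

-- A's pass-3 step
def pvStepA (qw : PySem.Set String) (st : Option (List (String × String)) × Int) (img : List (String × String)) :
    Option (List (String × String)) × Int :=
  if pvSc qw img > st.2 then (some img, pvSc qw img) else st

lemma pvSc_nonneg (qw : PySem.Set String) (img : List (String × String)) : 0 ≤ pvSc qw img := by
  simp [pvSc, PySem.Set.len_eq]

-- reduction lemmas for the step functions
lemma pvStepB_none {ql : String} {qw : PySem.Set String} {img : List (String × String)}
    (h : pvRank ql qw img = none) (i : Int) (ob : Option ((Int × Int × Int) × List (String × String))) :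
    pvStepB ql qw (i, ob) img = (i + 1, ob) := by simp [pvStepB, h]

lemma pvStepB_some_none {ql : String} {qw : PySem.Set String} {img : List (String × String)} {ts : Int × Int}
    (h : pvRank ql qw img = some ts) (i : Int) :
    pvStepB ql qw (i, none) img = (i + 1, some ((ts.1, ts.2, -i), img)) := by simp [pvStepB, h]

lemma pvStepB_some_some {ql : String} {qw : PySem.Set String} {img : List (String × String)} {ts : Int × Int}
    (h : pvRank ql qw img = some ts) (i : Int) (best : (Int × Int × Int) × List (String × String)) :
    pvStepB ql qw (i, some best) img
      = (i + 1, if pvKeyGt (ts.1, ts.2, -i) best.1 then some ((ts.1, ts.2, -i), img) else some best) := by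
  simp [pvStepB, h]

lemma pvAstep_none {ql : String} {qw : PySem.Set String} {img : List (String × String)}
    (h : pvRank ql qw img = none) (st : Option ((Int × Int) × List (String × String))) :
    pvAstep ql qw st img = st := by simp [pvAstep, h]

lemma pvAstep_some_none {ql : String} {qw : PySem.Set String} {img : List (String × String)} {ts : Int × Int}
    (h : pvRank ql qw img = some ts) :
    pvAstep ql qw none img = some (ts, img) := by simp [pvAstep, h]

lemma pvAstep_some_some {ql : String} {qw : PySem.Set String} {img : List (String × String)} {ts : Int × Int}
    (h : pvRank ql qw img = some ts) (best : (Int × Int) × List (String × String)) :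
    pvAstep ql qw (some best) img = if pvGt2 ts best.1 then some (ts, img) else some best := by
  simp [pvAstep, h]

lemma pvAbs_cons (ql : String) (qw : PySem.Set String) (st : Option ((Int × Int) × List (String × String)))
    (x : List (String × String)) (l : List (List (String × String))) :
    pvAbs ql qw st (x :: l) = pvAbs ql qw (pvAstep ql qw st x) l := rfl

-- tier classification
lemma pvRank_cases {ql : String} {qw : PySem.Set String} {img : List (String × String)} {ts : Int × Int}
    (h : pvRank ql qw img = some ts) :
    ts = (3, 0) ∨ ts = (2, 0) ∨ (ts.1 = 1 ∧ 0 < ts.2) := by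
  have hnn := pvSc_nonneg qw img
  rw [pvRank_def] at h
  split_ifs at h with h3 h2 h0
  · exact Or.inl (Option.some_inj.mp h).symm
  · exact Or.inr (Or.inl (Option.some_inj.mp h).symm)
  · have hts := (Option.some_inj.mp h).symm
    subst hts
    exact Or.inr (Or.inr ⟨rfl, by simp at h0; omega⟩)

lemma pvRank_of_f3 {ql : String} {qw : PySem.Set String} {img : List (String × String)}
    (h3 : pvF3 ql img = true) : pvRank ql qw img = some (3, 0) := by rw [pvRank_def]; simp [h3]

lemma pvRank_of_f2 {ql : String} {qw : PySem.Set String} {img : List (String × String)}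
    (h3 : pvF3 ql img = false) (h2 : pvF2 ql img = true) : pvRank ql qw img = some (2, 0) := by
  rw [pvRank_def]; simp [h3, h2]

lemma pvRank_not_f3 {ql : String} {qw : PySem.Set String} {img : List (String × String)} {ts : Int × Int}
    (h3 : pvF3 ql img = false) (h : pvRank ql qw img = some ts) :
    ts = (2, 0) ∨ (ts.1 = 1 ∧ 0 < ts.2) := by
  rw [pvRank_def] at h
  rw [h3, if_neg (by simp : ¬(false = true))] at h
  split_ifs at h with h2 h0
  · exact Or.inl (Option.some_inj.mp h).symm
  · have hts := (Option.some_inj.mp h).symm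
    subst hts
    exact Or.inr ⟨rfl, by have := pvSc_nonneg qw img; simp at h0; omega⟩

lemma pvRank_not_f3_f2 {ql : String} {qw : PySem.Set String} {img : List (String × String)} {ts : Int × Int}
    (h3 : pvF3 ql img = false) (h2 : pvF2 ql img = false) (h : pvRank ql qw img = some ts) :
    ts.1 = 1 ∧ 0 < ts.2 := by
  rw [pvRank_def] at h
  rw [h3, if_neg (by simp : ¬(false = true)), h2, if_neg (by simp : ¬(false = true))] at h
  split_ifs at h with h0
  · have hts := (Option.some_inj.mp h).symm
    subst hts
    exact ⟨rfl, by have := pvSc_nonneg qw img; simp at h0; omega⟩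

lemma pvRank_keyword {ql : String} {qw : PySem.Set String} {img : List (String × String)}
    (h3 : pvF3 ql img = false) (h2 : pvF2 ql img = false) :
    pvRank ql qw img = if pvSc qw img == 0 then none else some (1, pvSc qw img) := by
  rw [pvRank_def]; simp [h3, h2]

lemma pvKeyGt_eq_gt2 (t s i : Int) (b : Int × Int × Int) (hb : -i < b.2.2) :
    pvKeyGt (t, s, -i) b = pvGt2 (t, s) (b.1, b.2.1) := by
  have h : decide (b.2.2 < -i) = false := by simp; omega
  simp [pvKeyGt, pvGt2, h]

-- L1: B's loop, started at index i with a state whose stored index component is > -i,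
-- returns the same image as the index-free abstraction.
lemma pvBridge (ql : String) (qw : PySem.Set String) (l : List (List (String × String)))
    (i : Int) (ob : Option ((Int × Int × Int) × List (String × String)))
    (hi : ∀ p, ob = some p → -i < p.1.2.2) :
    ((l.foldl (pvStepB ql qw) (i, ob)).2).map Prod.snd
      = (pvAbs ql qw (ob.map pvShrink) l).map Prod.snd := by
  induction l generalizing i ob with
  | nil => cases ob <;> rfl
  | cons x l ih =>
    rw [List.foldl_cons, pvAbs_cons]
    cases ht : pvRank ql qw x with
    | none =>
      rw [pvStepB_none ht, pvAstep_none ht]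
      exact ih (i + 1) ob (fun p hp => by have := hi p hp; omega)
    | some ts =>
      cases ob with
      | none =>
        simp only [Option.map_none]
        rw [pvStepB_some_none ht, pvAstep_some_none ht]
        have := ih (i + 1) (some ((ts.1, ts.2, -i), x))
          (fun p hp => by cases hp; show -(i+1) < -i; omega)
        simpa [pvShrink] using this
      | some best =>
        have hb : -i < best.1.2.2 := hi best rfl
        simp only [Option.map_some]
        rw [pvStepB_some_some ht, pvAstep_some_some ht,
          pvKeyGt_eq_gt2 ts.1 ts.2 i best.1 hb]
        have hsh : (pvShrink best).1 = (best.1.1, best.1.2.1) := rfl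
        have heta : ((ts.1, ts.2) : Int × Int) = ts := rfl
        rw [hsh, heta]
        by_cases hg : pvGt2 ts (best.1.1, best.1.2.1) = true
        · rw [if_pos hg, if_pos hg]
          have := ih (i + 1) (some ((ts.1, ts.2, -i), x))
            (fun p hp => by cases hp; show -(i+1) < -i; omega)
          simpa [pvShrink] using this
        · rw [if_neg hg, if_neg hg]
          exact ih (i + 1) (some best) (fun p hp => by cases hp; omega)

-- a tier-3 best is absorbing
lemma pvAbsorb3 (ql : String) (qw : PySem.Set String) (l : List (List (String × String)))
    (im : List (String × String)) : pvAbs ql qw (some ((3, 0), im)) l = some ((3, 0), im) := by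
  induction l with
  | nil => rfl
  | cons x l ih =>
    rw [pvAbs_cons]
    cases ht : pvRank ql qw x with
    | none => rw [pvAstep_none ht]; exact ih
    | some ts =>
      have hlt : pvGt2 ts ((3 : Int), (0 : Int)) = false := by
        rcases pvRank_cases ht with h | h | h
        · subst h; simp [pvGt2]
        · subst h; simp [pvGt2]
        · obtain ⟨h1, _⟩ := h
          norm_num [pvGt2, h1]
      rw [pvAstep_some_some ht, if_neg (by simp [hlt])]
      exact ih

-- no tier-3 element follows: a tier-2 best is absorbing
lemma pvAbsorb2 (ql : String) (qw : PySem.Set String) (l : List (List (String × String)))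
    (im : List (String × String)) (h3 : ∀ y ∈ l, pvF3 ql y = false) :
    pvAbs ql qw (some ((2, 0), im)) l = some ((2, 0), im) := by
  induction l with
  | nil => rfl
  | cons x l ih =>
    have hx3 : pvF3 ql x = false := h3 x (by simp)
    have h3' : ∀ y ∈ l, pvF3 ql y = false := fun y hy => h3 y (by simp [hy])
    rw [pvAbs_cons]
    cases ht : pvRank ql qw x with
    | none => rw [pvAstep_none ht]; exact ih h3'
    | some ts =>
      have hlt : pvGt2 ts ((2 : Int), (0 : Int)) = false := by
        rcases pvRank_not_f3 hx3 ht with h | h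
        · subst h; simp [pvGt2]
        · obtain ⟨h1, _⟩ := h
          norm_num [pvGt2, h1]
      rw [pvAstep_some_some ht, if_neg (by simp [hlt])]
      exact ih h3'

-- first exact match wins
lemma pvFindA (ql : String) (qw : PySem.Set String) (l : List (List (String × String)))
    (x : List (String × String)) (st : Option ((Int × Int) × List (String × String)))
    (hfind : l.find? (pvF3 ql) = some x)
    (hst : ∀ p, st = some p → p.1.1 ≤ 2) :
    pvAbs ql qw st l = some ((3, 0), x) := by
  induction l generalizing st with
  | nil => simp at hfind
  | cons y l ih =>
    by_cases hy : pvF3 ql y = true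
    · rw [List.find?_cons_of_pos hy] at hfind
      have hxy : y = x := Option.some_inj.mp hfind
      subst hxy
      rw [pvAbs_cons]
      cases st with
      | none => rw [pvAstep_some_none (pvRank_of_f3 hy)]; exact pvAbsorb3 ql qw l y
      | some best =>
        have hg : pvGt2 ((3 : Int), (0 : Int)) best.1 = true := by
          have := hst best rfl
          simp [pvGt2]
          omega
        rw [pvAstep_some_some (pvRank_of_f3 hy), if_pos (by simp [hg])]
        exact pvAbsorb3 ql qw l y
    · simp only [Bool.not_eq_true] at hy
      rw [List.find?_cons_of_neg (by simp [hy])] at hfind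
      rw [pvAbs_cons]
      cases ht : pvRank ql qw y with
      | none => rw [pvAstep_none ht]; exact ih st hfind hst
      | some ts =>
        have hts : ts.1 ≤ 2 := by
          rcases pvRank_not_f3 hy ht with h | h
          · subst h; simp
          · omega
        cases st with
        | none =>
          rw [pvAstep_some_none ht]
          exact ih (some (ts, y)) hfind (by rintro p hp; cases hp; exact hts)
        | some best =>
          rw [pvAstep_some_some ht]
          by_cases hg : pvGt2 ts best.1 = true
          · rw [if_pos (by simp [hg])]
            exact ih (some (ts, y)) hfind (by rintro p hp; cases hp; exact hts)
          · rw [if_neg (by simpa using hg)]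
            exact ih (some best) hfind hst

-- no exact match anywhere: first containment match wins
lemma pvFindB (ql : String) (qw : PySem.Set String) (l : List (List (String × String)))
    (x : List (String × String)) (st : Option ((Int × Int) × List (String × String)))
    (h3 : ∀ y ∈ l, pvF3 ql y = false)
    (hfind : l.find? (pvF2 ql) = some x)
    (hst : ∀ p, st = some p → p.1.1 ≤ 1) :
    pvAbs ql qw st l = some ((2, 0), x) := by
  induction l generalizing st with
  | nil => simp at hfind
  | cons y l ih =>
    have hy3 : pvF3 ql y = false := h3 y (by simp)
    have h3' : ∀ y ∈ l, pvF3 ql y = false := fun y hy => h3 y (by simp [hy])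
    by_cases hy : pvF2 ql y = true
    · rw [List.find?_cons_of_pos hy] at hfind
      have hxy : y = x := Option.some_inj.mp hfind
      subst hxy
      rw [pvAbs_cons]
      cases st with
      | none => rw [pvAstep_some_none (pvRank_of_f2 hy3 hy)]; exact pvAbsorb2 ql qw l y h3'
      | some best =>
        have hg : pvGt2 ((2 : Int), (0 : Int)) best.1 = true := by
          have := hst best rfl
          simp [pvGt2]
          omega
        rw [pvAstep_some_some (pvRank_of_f2 hy3 hy), if_pos (by simp [hg])]
        exact pvAbsorb2 ql qw l y h3'
    · simp only [Bool.not_eq_true] at hy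
      rw [List.find?_cons_of_neg (by simp [hy])] at hfind
      rw [pvAbs_cons]
      cases ht : pvRank ql qw y with
      | none => rw [pvAstep_none ht]; exact ih st h3' hfind hst
      | some ts =>
        have hts : ts.1 ≤ 1 := (pvRank_not_f3_f2 hy3 hy ht).1.le
        cases st with
        | none =>
          rw [pvAstep_some_none ht]
          exact ih (some (ts, y)) h3' hfind (by rintro p hp; cases hp; exact hts)
        | some best =>
          rw [pvAstep_some_some ht]
          by_cases hg : pvGt2 ts best.1 = true
          · rw [if_pos (by simp [hg])]
            exact ih (some (ts, y)) h3' hfind (by rintro p hp; cases hp; exact hts)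
          · rw [if_neg (by simpa using hg)]
            exact ih (some best) h3' hfind hst

-- relation between the abstract state and A's pass-3 state
def pvRel (st : Option ((Int × Int) × List (String × String)))
    (ab : Option (List (String × String)) × Int) : Prop :=
  (st = none ∧ ab.1 = none ∧ ab.2 = 0) ∨
  (∃ im s, st = some ((1, s), im) ∧ ab.1 = some im ∧ ab.2 = s ∧ 0 < s)

-- no exact or containment match anywhere: the one-pass loop simulates A's keyword fold
lemma pvFoldC (ql : String) (qw : PySem.Set String) (l : List (List (String × String)))
    (st : Option ((Int × Int) × List (String × String))) (ab : Option (List (String × String)) × Int)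
    (h3 : ∀ y ∈ l, pvF3 ql y = false) (h2 : ∀ y ∈ l, pvF2 ql y = false)
    (hrel : pvRel st ab) :
    pvRel (pvAbs ql qw st l) (l.foldl (pvStepA qw) ab) := by
  induction l generalizing st ab with
  | nil => exact hrel
  | cons y l ih =>
    have hy3 : pvF3 ql y = false := h3 y (by simp)
    have hy2 : pvF2 ql y = false := h2 y (by simp)
    have h3' : ∀ y ∈ l, pvF3 ql y = false := fun y hy => h3 y (by simp [hy])
    have h2' : ∀ y ∈ l, pvF2 ql y = false := fun y hy => h2 y (by simp [hy])
    have hsc := pvSc_nonneg qw y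
    rw [pvAbs_cons, List.foldl_cons]
    by_cases h0 : pvSc qw y = 0
    · have ht : pvRank ql qw y = none := by rw [pvRank_keyword hy3 hy2, if_pos (by simp [h0])]
      have ha : pvStepA qw ab y = ab := by
        unfold pvStepA
        rcases hrel with ⟨_, _, hb⟩ | ⟨im, s, _, _, hb, hs⟩ <;> rw [if_neg (by omega)]
      rw [pvAstep_none ht, ha]
      exact ih st ab h3' h2' hrel
    · have ht : pvRank ql qw y = some (1, pvSc qw y) := by
        rw [pvRank_keyword hy3 hy2, if_neg (by simp [h0])]
      rcases hrel with ⟨hstn, hb1, hb2⟩ | ⟨im, s, hsts, hb1, hb2, hs⟩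
      · subst hstn
        have ha : pvStepA qw ab y = (some y, pvSc qw y) := by
          unfold pvStepA
          rw [if_pos (by omega)]
        rw [pvAstep_some_none ht, ha]
        exact ih (some ((1, pvSc qw y), y)) _ h3' h2'
          (Or.inr ⟨y, pvSc qw y, rfl, rfl, rfl, by omega⟩)
      · subst hsts
        rw [pvAstep_some_some ht]
        by_cases hgt : pvSc qw y > s
        · have hg : pvGt2 ((1 : Int), pvSc qw y) ((1 : Int), s) = true := by
            simp [pvGt2]
            omega
          have ha : pvStepA qw ab y = (some y, pvSc qw y) := by
            unfold pvStepA
            rw [if_pos (by omega)]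
          rw [ha, if_pos (by simp [hg])]
          exact ih (some ((1, pvSc qw y), y)) _ h3' h2'
            (Or.inr ⟨y, pvSc qw y, rfl, rfl, rfl, by omega⟩)
        · have hg : pvGt2 ((1 : Int), pvSc qw y) ((1 : Int), s) = false := by
            simp [pvGt2]
            omega
          have ha : pvStepA qw ab y = ab := by
            unfold pvStepA
            rw [if_neg (by omega)]
          rw [ha, if_neg (by simp [hg])]
          exact ih (some ((1, s), im)) ab h3' h2' (Or.inr ⟨im, s, rfl, hb1, hb2, hs⟩)

-- the two ports agree on every input
set_option maxHeartbeats 1600000 in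
lemma pvMain (query : String) (indexed_images : List (List (String × String))) :
    find_best_image_match_py query indexed_images = find_best_image_match_py_alt query indexed_images := by
  set ql := PySem.Str.strip (PySem.Str.lower query) with hql
  set qw := PySem.Set.ofList (PySem.Str.split₀ (PySem.Str.replace ql "," " ")) with hqw
  have hB : find_best_image_match_py_alt query indexed_images
      = ((indexed_images.foldl (pvStepB ql qw) ((0 : Int), none)).2).map Prod.snd := rfl
  have hBr : find_best_image_match_py_alt query indexed_images
      = (pvAbs ql qw none indexed_images).map Prod.snd := by
    rw [hB, pvBridge ql qw indexed_images 0 none (by simp)]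
    rfl
  cases indexed_images with
  | nil => simp [find_best_image_match_py, hBr, pvAbs]
  | cons z zs =>
    set l := z :: zs with hl
    have e3 : (fun img => PySem.Str.lower (PySem.Dict.getD (PySem.Dict.mk img) "filename" "") == ql)
        = pvF3 ql := rfl
    have e2 : (fun img => PySem.Str.isIn ql (PySem.Str.lower (PySem.Dict.getD (PySem.Dict.mk img) "filename" "")))
        = pvF2 ql := rfl
    have ef : (fun (st : Option (List (String × String)) × Int) img =>
        let desc_words := PySem.Set.ofList (PySem.Str.split₀ (PySem.Str.lower (PySem.Dict.getD (PySem.Dict.mk img) "description" "")))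
        let score := PySem.Set.len (PySem.Set.inter qw desc_words)
        if score > st.2 then (some img, score) else st)
        = pvStepA qw := by
      funext st img
      rfl
    rw [hBr]
    simp only [find_best_image_match_py]
    rw [if_neg (by simp [hl]), ← hql, ← hqw, e3, e2, ef]
    cases h3 : l.find? (pvF3 ql) with
    | some x =>
      rw [pvFindA ql qw l x none h3 (by simp)]
      rfl
    | none =>
      have h3' : ∀ y ∈ l, pvF3 ql y = false := by
        intro y hy
        simpa using List.find?_eq_none.mp h3 y hy
      cases h2 : l.find? (pvF2 ql) with
      | some x =>
        rw [pvFindB ql qw l x none h3' h2 (by simp)]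
        rfl
      | none =>
        have h2' : ∀ y ∈ l, pvF2 ql y = false := by
          intro y hy
          simpa using List.find?_eq_none.mp h2 y hy
        have hc := pvFoldC ql qw l none (none, 0) h3' h2' (Or.inl ⟨rfl, rfl, rfl⟩)
        rcases hc with ⟨hs, hb1, hb2⟩ | ⟨im, s, hs, hb1, hb2, hpos⟩
        · rw [hs]
          simp only
          rw [if_neg (by omega : ¬ (l.foldl (pvStepA qw) (none, 0)).2 > 0)]
          rfl
        · rw [hs]
          simp only
          rw [if_pos (by omega : (l.foldl (pvStepA qw) (none, 0)).2 > 0), hb1]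
          rfl

-- ===== VERDICT (by name: the statement is the Claim_ definition above) =====
theorem find_best_image_match_py_spec : Claim_equal_find_best_image_match_py := by
  intro query indexed_images _
  unfold Spec_find_best_image_match_py
  exact pvMain query indexed_images
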